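-- pv_equiv track=rewrite | github.com/joshuacox/adventOfCode2025 | 2-1.py | generate_invalid_ids
-- ===== SOURCE A (Python) =====
-- from typing import List, Tuple
--
-- def generate_invalid_ids(limit: int) -> List[int]:
--     """
--     Generate all numbers <= limit whose decimal representation is a
--     non‑empty string repeated twice (e.g., 55, 6464, 123123).
--     """
--     invalid_ids = []
--     # The length of the full number cannot exceed len(str(limit))
--     max_len = len(str(limit))
--     # Full length must be even, so half length ranges from 1 to max_len // 2
--     for half_len in range(1, max_len // 2 + 1):
--         # The first digit of the half cannot be zero (no leading zeros in the final number)
--         start_half = 10 ** (half_len - 1)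
--         end_half = 10 ** half_len - 1
--         for half in range(start_half, end_half + 1):
--             s = str(half)
--             candidate = int(s + s)  # repeat the half string
--             if candidate > limit:
--                 # Since halves are increasing, we can break early for this half_len
--                 break
--             invalid_ids.append(candidate)
--     return invalid_ids
-- ===== SOURCE B (Python) =====
-- def generate_invalid_ids(limit: int) -> list:
--     """
--     The doubled numbers are exactly dbl(h) = int(str(h)*2) for h = 1, 2, 3, ...,
--     and dbl is strictly increasing, so the answer is the single flat list
--     dbl(1), ..., dbl(top) for a cutoff computed in closed form from limit alone:
--     with e = len(str(limit)) // 2, the largest valid half is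
--     top = min(10**e - 1, limit // (10**e + 1)).
--     No nested loops, no candidate comparison, no break.
--     """
--     e = len(str(limit)) // 2
--     top = min(10 ** e - 1, limit // (10 ** e + 1))
--     return [h * (10 ** len(str(h)) + 1) for h in range(1, top + 1)]
-- ===== Notes on version B (the rewrite author's own statement) =====
-- stated objective: simpler
-- what changed: A nests a loop over half-lengths around a scan that string-doubles each half, re-parses it with int(), compares the candidate against the limit and breaks; B computes the largest valid half in closed form from the length of str(limit) alone (valid because doubling a half is strictly increasing in the half) and returns one flat arithmetic comprehension over the halves up to that cutoff, with no nested loops, no string doubling, no candidate comparison and no break.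
import Mathlib
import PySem

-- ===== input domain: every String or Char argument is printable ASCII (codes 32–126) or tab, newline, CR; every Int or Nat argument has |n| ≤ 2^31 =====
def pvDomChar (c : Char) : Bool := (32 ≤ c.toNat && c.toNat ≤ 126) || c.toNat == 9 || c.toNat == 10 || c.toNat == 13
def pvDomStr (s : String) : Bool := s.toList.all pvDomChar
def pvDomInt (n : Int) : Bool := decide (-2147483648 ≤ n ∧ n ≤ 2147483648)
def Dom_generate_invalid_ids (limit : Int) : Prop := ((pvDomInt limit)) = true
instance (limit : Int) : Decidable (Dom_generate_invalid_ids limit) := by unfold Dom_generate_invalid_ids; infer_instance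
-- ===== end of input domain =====

-- B replaces A's nested scan (string-double each half, parse, compare, break, per
-- half-length) by a closed-form largest valid half and one flat arithmetic map; same values.


-- ===== PORT A =====
-- Inner `for half in range(...)` loop of A, with its early `break`.
-- `int(s + s)` is PySem.Int.ofStr?; it never returns `none` on the strings A builds
-- (half ≥ 1 gives a pure digit string), so the `none` arm is unreachable.
def pyAInner (limit : Int) (halves : List Int) (acc : List Int) : List Int :=
  match halves with
  | [] => acc
  | half :: rest =>
    let s := PySem.Int.toStr half
    match PySem.Int.ofStr? (s ++ s) with
    | none => acc
    | some candidate =>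
      if candidate > limit then acc
      else pyAInner limit rest (acc ++ [candidate])

def generate_invalid_ids (limit : Int) : List Int :=
  let max_len : Int := PySem.Str.len (PySem.Int.toStr limit)
  (PySem.List.pyRange 1 (PySem.Int.floordiv max_len 2 + 1) 1).foldl
    (fun invalid_ids half_len =>
      -- half_len ≥ 1 inside the range, so .toNat on the exponents is exact
      let start_half : Int := 10 ^ (half_len - 1).toNat
      let end_half : Int := 10 ^ half_len.toNat - 1
      pyAInner limit (PySem.List.pyRange start_half (end_half + 1) 1) invalid_ids)
    []

-- ===== PORT B =====
-- e = len(str(limit)) // 2 ≥ 0, so `.toNat` is exact; len(str(h)) ≥ 1 likewise.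
def generate_invalid_ids_alt (limit : Int) : List Int :=
  let e : Nat := (PySem.Int.floordiv (PySem.Str.len (PySem.Int.toStr limit)) 2).toNat
  let top : Int := min ((10 : Int) ^ e - 1) (PySem.Int.floordiv limit ((10 : Int) ^ e + 1))
  (PySem.List.pyRange 1 (top + 1) 1).map
    (fun h => h * ((10 : Int) ^ (PySem.Str.len (PySem.Int.toStr h)).toNat + 1))

-- ===== PRECONDITION & SPEC =====
def Spec_generate_invalid_ids (limit : Int) (out : List Int) : Prop := out = generate_invalid_ids_alt limit
instance (limit : Int) (out : List Int) : Decidable (Spec_generate_invalid_ids limit out) := by unfold Spec_generate_invalid_ids; infer_instance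

-- ===== CLAIM (what is proved, stated in full; the proofs are below) =====
def Claim_equal_generate_invalid_ids : Prop := ∀ (limit : Int), Dom_generate_invalid_ids limit → Spec_generate_invalid_ids limit (generate_invalid_ids limit)

-- ===== LEMMAS AND PROOFS =====

-- B's per-half map function (proof-side name for the lambda in the B port)
def dblA (h : Int) : Int := h * ((10 : Int) ^ (PySem.Str.len (PySem.Int.toStr h)).toNat + 1)

-- decimal value of a digit string, accumulated from the left (Python's int() on digits)
def digitsFoldVal (cs : List Char) (a : Nat) : Nat :=
  cs.foldl (fun a c => a * 10 + (c.toNat - '0'.toNat)) a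

theorem isIntSpace_of_isDigit (c : Char) (h : c.isDigit = true) :
    PySem.Int.isIntSpace c = false := by
  simp only [PySem.Int.isIntSpace, Bool.or_eq_false_iff, decide_eq_false_iff_not]
  refine ⟨⟨⟨⟨⟨?_, ?_⟩, ?_⟩, ?_⟩, ?_⟩, ?_⟩ <;> rintro rfl <;> exact absurd h (by decide)

theorem dropWhile_digits (cs : List Char) (h : cs.all Char.isDigit = true) :
    cs.dropWhile PySem.Int.isIntSpace = cs := by
  cases cs with
  | nil => rfl
  | cons c cs =>
    simp only [List.all_cons, Bool.and_eq_true] at h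
    exact List.dropWhile_cons_of_neg (by simp [isIntSpace_of_isDigit c h.1])

theorem ne_dash_of_isDigit (c : Char) (h : c.isDigit = true) : c ≠ '-' := by
  rintro rfl; exact absurd h (by decide)

theorem ne_plus_of_isDigit (c : Char) (h : c.isDigit = true) : c ≠ '+' := by
  rintro rfl; exact absurd h (by decide)

theorem match1_cons (c : Char) (cs : List Char) (h1 : c ≠ '-') (h2 : c ≠ '+')
    (f1 f2 f3 : List Char → Option Int) :
    PySem.Int.ofChars?.match_1 (fun _ => Option Int) (c :: cs) f1 f2 f3 = f3 (c :: cs) := by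
  unfold PySem.Int.ofChars?.match_1
  have hred : ∀ (F : Char → List Char → Option Int) (E : Nat.hasNotBit 2 (c :: cs).ctorIdx → Option Int),
      PySem.Int.ofChars?._sparseCasesOn_1 (motive := fun _ => Option Int) (c :: cs) F E = F c cs :=
    fun _ _ => rfl
  rw [hred, dif_neg h1, dif_neg h2]

theorem digitChar_val (m : Nat) (h : m < 10) : (Nat.digitChar m).toNat - '0'.toNat = m := by
  interval_cases m <;> decide

theorem toDigits_foldVal (m : Nat) :
    ∀ a, digitsFoldVal (Nat.toDigits 10 m) a = a * 10 ^ (Nat.toDigits 10 m).length + m := by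
  induction m using Nat.strong_induction_on with
  | _ m ih =>
    intro a
    by_cases hm : m < 10
    · rw [Nat.toDigits_of_lt_base hm]
      simp only [digitsFoldVal, List.foldl_cons, List.foldl_nil, List.length_cons,
        List.length_nil]
      rw [digitChar_val m hm]
      norm_num
    · have h10 : (10 : Nat) ≤ m := by omega
      rw [Nat.toDigits_of_base_le (by norm_num) h10]
      have hlt : m / 10 < m := Nat.div_lt_self (by omega) (by norm_num)
      have hfold : digitsFoldVal (Nat.toDigits 10 (m / 10) ++ [(m % 10).digitChar]) a
          = digitsFoldVal (Nat.toDigits 10 (m / 10)) a * 10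
            + ((m % 10).digitChar.toNat - '0'.toNat) := by
        simp only [digitsFoldVal, List.foldl_append, List.foldl_cons, List.foldl_nil]
      rw [hfold, ih _ hlt a, digitChar_val _ (Nat.mod_lt _ (by norm_num))]
      have : (Nat.toDigits 10 (m / 10) ++ [(m % 10).digitChar]).length
          = (Nat.toDigits 10 (m / 10)).length + 1 := by simp
      rw [this, pow_succ]
      have := Nat.div_add_mod m 10
      set k := 10 ^ (Nat.toDigits 10 (m / 10)).length
      ring_nf
      omega

theorem toDigits_all_digit (m : Nat) : (Nat.toDigits 10 m).all Char.isDigit = true := by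
  rw [List.all_eq_true]
  intro c hc
  exact Nat.isDigit_of_mem_toDigits (by norm_num) (by norm_num) hc

-- Python's int() on a non-empty pure-digit string returns its decimal value.
theorem ofChars?_digits (ds : List Char) (hne : ds ≠ []) (hd : ds.all Char.isDigit = true) :
    PySem.Int.ofChars? ds = some ((digitsFoldVal ds 0 : Nat) : Int) := by
  obtain ⟨p, g, hconn, hplink, hgnil, hgcons⟩ :
    ∃ (p : List Char → Option Nat) (g : List Char → Bool → Nat → Option Nat),
      (∀ s : List Char, PySem.Int.ofChars? s =
        PySem.Int.ofChars?.match_1 (fun _ => Option Int)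
          ((List.dropWhile PySem.Int.isIntSpace (List.dropWhile PySem.Int.isIntSpace s).reverse).reverse)
          (fun ds => Option.map (fun n => -n) ((p ds).bind (fun a => some ((a : Nat) : Int))))
          (fun ds => Option.map (fun n => n) ((p ds).bind (fun a => some ((a : Nat) : Int))))
          (fun ds => Option.map (fun n => n) ((p ds).bind (fun a => some ((a : Nat) : Int)))))
      ∧ (∀ ds : List Char, p ds = match ds with | [] => none | cs => g cs false 0)
      ∧ (∀ b a, g [] b a = if b then some a else none)
      ∧ (∀ c rest b a, g (c :: rest) b a =
          if c.isDigit then g rest true (a * 10 + (c.toNat - '0'.toNat))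
          else if c = '_' ∧ b = true then
            (match rest with | d :: _ => if d.isDigit then g rest false a else none | [] => none)
          else none)
      := ⟨_, _, fun s => rfl, fun ds => rfl, fun b a => rfl, fun c rest b a => rfl⟩
  have hg : ∀ (cs : List Char) (a : Nat), cs.all Char.isDigit = true →
      g cs true a = some (digitsFoldVal cs a) := by
    intro cs
    induction cs with
    | nil => intro a _; rw [hgnil]; simp [digitsFoldVal]
    | cons c tl ihc =>
      intro a hall
      simp only [List.all_cons, Bool.and_eq_true] at hall
      rw [hgcons, if_pos hall.1, ihc _ hall.2]
      simp only [digitsFoldVal, List.foldl_cons]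
  have hstrip : (List.dropWhile PySem.Int.isIntSpace
      (List.dropWhile PySem.Int.isIntSpace ds).reverse).reverse = ds := by
    rw [dropWhile_digits ds hd, dropWhile_digits _ (by simpa using hd), List.reverse_reverse]
  rw [hconn ds, hstrip]
  obtain ⟨c, tl, rfl⟩ : ∃ c tl, ds = c :: tl := by
    cases ds with
    | nil => exact absurd rfl hne
    | cons c tl => exact ⟨c, tl, rfl⟩
  have hcd : c.isDigit = true := by
    simp only [List.all_cons, Bool.and_eq_true] at hd; exact hd.1
  rw [match1_cons c tl (ne_dash_of_isDigit c hcd) (ne_plus_of_isDigit c hcd)]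
  rw [hplink (c :: tl)]
  have hredm : (match c :: tl with | [] => (none : Option Nat) | cs => g cs false 0)
      = g (c :: tl) false 0 := rfl
  rw [hredm, hgcons, if_pos hcd]
  have htl : tl.all Char.isDigit = true := by
    simp only [List.all_cons, Bool.and_eq_true] at hd; exact hd.2
  rw [hg tl _ htl]
  simp only [Option.bind_some, Option.map_some, Option.some.injEq, Int.natCast_inj]
  simp only [digitsFoldVal, List.foldl_cons]

-- the decimal string of h ≥ 0 is toDigits of its magnitude
theorem toChars_nonneg (h : Int) (h1 : 0 ≤ h) :
    PySem.Int.toChars h = Nat.toDigits 10 h.toNat := by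
  simp [PySem.Int.toChars, show ¬ h < 0 by omega]

-- Python's int(str(h) + str(h)) = h * (10 ^ len(str(h)) + 1) for h ≥ 1
theorem parse_double (h : Int) (h1 : 1 ≤ h) :
    PySem.Int.ofStr? (PySem.Int.toStr h ++ PySem.Int.toStr h)
      = some (h * ((10 : Int) ^ (PySem.Int.toChars h).length + 1)) := by
  have hts : (PySem.Int.toStr h ++ PySem.Int.toStr h).toList
      = PySem.Int.toChars h ++ PySem.Int.toChars h := by
    simp [PySem.Int.toList_toStr]
  have hof : PySem.Int.ofStr? (PySem.Int.toStr h ++ PySem.Int.toStr h)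
      = PySem.Int.ofChars? (PySem.Int.toChars h ++ PySem.Int.toChars h) := by
    rw [PySem.Int.ofStr?, hts]
  rw [hof, toChars_nonneg h (by omega)]
  set m := h.toNat with hm
  have hne : Nat.toDigits 10 m ≠ [] := by
    have := @Nat.length_toDigits_pos 10 m
    intro hcontra; rw [hcontra] at this; simp at this
  have hall : (Nat.toDigits 10 m ++ Nat.toDigits 10 m).all Char.isDigit = true := by
    simp [toDigits_all_digit]
  rw [ofChars?_digits _ (by simp [hne]) hall]
  have hval : digitsFoldVal (Nat.toDigits 10 m ++ Nat.toDigits 10 m) 0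
      = m * 10 ^ (Nat.toDigits 10 m).length + m := by
    have happ : digitsFoldVal (Nat.toDigits 10 m ++ Nat.toDigits 10 m) 0
        = digitsFoldVal (Nat.toDigits 10 m) (digitsFoldVal (Nat.toDigits 10 m) 0) := by
      simp [digitsFoldVal]
    rw [happ, toDigits_foldVal m 0, toDigits_foldVal m]
    ring_nf
  have hcast : ((m * 10 ^ (Nat.toDigits 10 m).length + m : Nat) : Int)
      = h * ((10 : Int) ^ (Nat.toDigits 10 m).length + 1) := by
    have hh : ((m : Nat) : Int) = h := by omega
    push_cast
    rw [hh]; ring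
  rw [hval]
  exact congrArg some hcast

-- length of the decimal string of values in [10^d, 10^(d+1))
theorem toDigits_length_eq (m d : Nat) (hl : 10 ^ d ≤ m) (hh : m < 10 ^ (d + 1)) :
    (Nat.toDigits 10 m).length = d + 1 := by
  have hle : (Nat.toDigits 10 m).length ≤ d + 1 :=
    (Nat.length_toDigits_le_iff (by norm_num) (by omega)).mpr hh
  rcases Nat.eq_zero_or_pos d with rfl | hd
  · have := @Nat.length_toDigits_pos 10 m
    omega
  · by_contra hne
    have hld : (Nat.toDigits 10 m).length ≤ d := by omega
    have := (Nat.length_toDigits_le_iff (b := 10) (n := m) (k := d) (by norm_num) hd).mp hld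
    omega

-- digit count of h ≥ 1: 10^(nd-1) ≤ h < 10^(nd), nd ≥ 1
theorem toDigits_char (m : Nat) (h1 : 1 ≤ m) :
    10 ^ ((Nat.toDigits 10 m).length - 1) ≤ m ∧ m < 10 ^ (Nat.toDigits 10 m).length
      ∧ 1 ≤ (Nat.toDigits 10 m).length := by
  have hpos : 0 < (Nat.toDigits 10 m).length := @Nat.length_toDigits_pos 10 m
  refine ⟨?_, ?_, hpos⟩
  · by_contra hc
    push_neg at hc
    rcases Nat.eq_or_lt_of_le hpos with h1len | h2len
    · rw [← h1len] at hc; simp at hc; omega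
    · have := (Nat.length_toDigits_le_iff (b := 10) (n := m)
        (k := (Nat.toDigits 10 m).length - 1) (by norm_num) (by omega)).mpr (by omega)
      omega
  · by_contra hc
    push_neg at hc
    have := (Nat.length_toDigits_le_iff (b := 10) (n := m)
      (k := (Nat.toDigits 10 m).length) (by norm_num) hpos).mp le_rfl
    omega

-- len(str h) for h ≥ 1, as the Nat the B port uses
theorem strlen_toNat (h : Int) (h1 : 1 ≤ h) :
    (PySem.Str.len (PySem.Int.toStr h)).toNat = (Nat.toDigits 10 h.toNat).length := by
  rw [PySem.Str.len_eq, PySem.Int.toList_toStr, toChars_nonneg h (by omega)]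
  exact Int.toNat_natCast _

-- dblA h = h * (10^(d+1)+1) when 10^d ≤ h < 10^(d+1)
theorem dblA_eq (h : Int) (d : Nat) (hl : (10 : Int) ^ d ≤ h) (hh : h < (10 : Int) ^ (d + 1)) :
    dblA h = h * ((10 : Int) ^ (d + 1) + 1) := by
  have h1 : 1 ≤ h := le_trans (one_le_pow₀ (by norm_num)) hl
  have hnd : (Nat.toDigits 10 h.toNat).length = d + 1 := by
    refine toDigits_length_eq h.toNat d ?_ ?_
    · have : ((10 ^ d : Nat) : Int) ≤ h := by push_cast; omega
      omega
    · have : h < ((10 ^ (d + 1) : Nat) : Int) := by push_cast; omega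
      omega
  rw [dblA, strlen_toNat h h1, hnd]

-- bounds for the doubled number of h with d+1 digits
theorem dbl_bounds (h : Int) (d : Nat) (hl : (10 : Int) ^ d ≤ h) (hh : h < (10 : Int) ^ (d + 1)) :
    (10 : Int) ^ (2 * d + 1) ≤ h * ((10 : Int) ^ (d + 1) + 1)
      ∧ h * ((10 : Int) ^ (d + 1) + 1) < (10 : Int) ^ (2 * (d + 1)) := by
  have hp : (0 : Int) < 10 ^ (d + 1) := by positivity
  constructor
  · calc (10 : Int) ^ (2 * d + 1) = 10 ^ d * 10 ^ (d + 1) := by ring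
    _ ≤ h * (10 ^ (d + 1)) := by
        exact mul_le_mul_of_nonneg_right hl (by positivity)
    _ ≤ h * (10 ^ (d + 1) + 1) := by
        have h0 : (0 : Int) < h := lt_of_lt_of_le (by positivity) hl
        nlinarith
  · have h1 : h ≤ 10 ^ (d + 1) - 1 := by omega
    calc h * ((10 : Int) ^ (d + 1) + 1) ≤ (10 ^ (d + 1) - 1) * (10 ^ (d + 1) + 1) := by
          exact mul_le_mul_of_nonneg_right h1 (by positivity)
    _ = 10 ^ (d + 1) * 10 ^ (d + 1) - 1 := by ring
    _ < (10 : Int) ^ (2 * (d + 1)) := by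
          have : (10 : Int) ^ (2 * (d + 1)) = 10 ^ (d + 1) * 10 ^ (d + 1) := by ring
          omega

-- abbreviations used throughout the cutoff argument (fixed limit)
-- E = len(str(limit)) // 2, H = B's closed-form top
def pvE (limit : Int) : Nat := (PySem.Int.floordiv (PySem.Str.len (PySem.Int.toStr limit)) 2).toNat
def pvH (limit : Int) : Int :=
  min ((10 : Int) ^ pvE limit - 1) (PySem.Int.floordiv limit ((10 : Int) ^ pvE limit + 1))

-- for limit ≥ 1: 10^(L-1) ≤ limit < 10^L with L = len(str limit), and 2*E ≤ L, E ≥ L-1/…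
theorem limit_len_char (limit : Int) (h1 : 1 ≤ limit) :
    ∃ L : Nat, 1 ≤ L ∧ (10 : Int) ^ (L - 1) ≤ limit ∧ limit < (10 : Int) ^ L
      ∧ pvE limit = L / 2 := by
  refine ⟨(Nat.toDigits 10 limit.toNat).length, ?_, ?_, ?_, ?_⟩
  · exact (toDigits_char limit.toNat (by omega)).2.2
  · obtain ⟨hlo, _, _⟩ := toDigits_char limit.toNat (by omega)
    have : ((10 ^ ((Nat.toDigits 10 limit.toNat).length - 1) : Nat) : Int) ≤ limit := by omega
    push_cast at this; omega
  · obtain ⟨_, hhi, _⟩ := toDigits_char limit.toNat (by omega)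
    have : limit < ((10 ^ (Nat.toDigits 10 limit.toNat).length : Nat) : Int) := by omega
    push_cast at this; omega
  · unfold pvE
    rw [PySem.Str.len_eq, PySem.Int.toList_toStr, toChars_nonneg limit (by omega)]
    rw [show ((((Nat.toDigits 10 limit.toNat).length : Nat) : Int)) = ((Nat.toDigits 10 limit.toNat).length : Int) from rfl]
    rw [show ((2 : Int)) = ((2 : Nat) : Int) from rfl, PySem.Int.floordiv_natCast]
    exact Int.toNat_natCast _

-- THE CUTOFF CHARACTERISATION: for h ≥ 1, dblA h ≤ limit ↔ h ≤ pvH limit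
theorem char_cutoff (limit h : Int) (h1 : 1 ≤ h) :
    dblA h ≤ limit ↔ h ≤ pvH limit := by
  set E : Nat := pvE limit with hE
  have hpE : (0 : Int) < 10 ^ E + 1 := by positivity
  obtain ⟨hdlo, hdhi, hdpos⟩ := toDigits_char h.toNat (by omega)
  set nd : Nat := (Nat.toDigits 10 h.toNat).length with hnd
  set d : Nat := nd - 1 with hd
  have hlo : (10 : Int) ^ d ≤ h := by
    have : ((10 ^ d : Nat) : Int) ≤ h := by omega
    push_cast at this; omega
  have hhi : h < (10 : Int) ^ (d + 1) := by
    have hnd1 : nd = d + 1 := by omega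
    have : h < ((10 ^ nd : Nat) : Int) := by omega
    rw [hnd1] at this; push_cast at this; omega
  have hdbl : dblA h = h * ((10 : Int) ^ (d + 1) + 1) := dblA_eq h d hlo hhi
  obtain ⟨hb1, hb2⟩ := dbl_bounds h d hlo hhi
  constructor
  · intro hle
    have hlim1 : 1 ≤ limit := by
      have : (1 : Int) ≤ 10 ^ (2 * d + 1) := one_le_pow₀ (by norm_num)
      omega
    obtain ⟨L, hL1, hLlo, hLhi, hLE⟩ := limit_len_char limit hlim1
    -- 10^(2d+1) ≤ limit < 10^L gives 2d+2 ≤ L, so d+1 ≤ E = L/2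
    have h2dL : 2 * d + 2 ≤ L := by
      by_contra hc
      push_neg at hc
      have : (10 : Int) ^ L ≤ 10 ^ (2 * d + 1) :=
        pow_le_pow_right₀ (by norm_num) (by omega)
      omega
    have hEL2 : E = L / 2 := by rw [hE]; exact hLE
    have hdE : d + 1 ≤ E := by omega
    unfold pvH
    rw [← hE]
    have hhE : h ≤ (10 : Int) ^ E - 1 := by
      have : (10 : Int) ^ (d + 1) ≤ 10 ^ E := pow_le_pow_right₀ (by norm_num) hdE
      omega
    have hfd : h ≤ PySem.Int.floordiv limit ((10 : Int) ^ E + 1) := by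
      rw [PySem.Int.le_floordiv_iff_mul_le hpE]
      rcases Nat.eq_or_lt_of_le hdE with heq | hlt
      · rw [← heq]; omega
      · -- d+1 < E: h*(10^E+1) ≤ (10^(d+1)-1)(10^E+1) < 10^(2E-1) ≤ 10^(L-1) ≤ limit
        have hhub : h ≤ 10 ^ (d + 1) - 1 := by omega
        have hEe : d + 1 ≤ E - 1 := by omega
        have hstep : h * ((10 : Int) ^ E + 1) ≤ (10 ^ (d + 1) - 1) * (10 ^ E + 1) :=
          mul_le_mul_of_nonneg_right hhub (by positivity)
        have hexp : (10 ^ (d + 1) - 1 : Int) * (10 ^ E + 1) < 10 ^ (d + 1 + E) := by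
          have h1e : (10 : Int) ^ (d + 1) ≤ 10 ^ E := pow_le_pow_right₀ (by norm_num) (by omega)
          have : (10 ^ (d + 1) - 1 : Int) * (10 ^ E + 1)
              = 10 ^ (d + 1) * 10 ^ E + 10 ^ (d + 1) - 10 ^ E - 1 := by ring
          rw [this, ← pow_add]
          omega
        have hexp2 : (10 : Int) ^ (d + 1 + E) ≤ 10 ^ (L - 1) := by
          exact pow_le_pow_right₀ (by norm_num) (by omega)
        omega
    omega
  · intro hle
    unfold pvH at hle
    rw [← hE] at hle
    have hfd : h * ((10 : Int) ^ E + 1) ≤ limit := by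
      have := le_min_iff.mp hle
      exact (PySem.Int.le_floordiv_iff_mul_le hpE).mp this.2
    have hlim1 : 1 ≤ limit := by nlinarith [one_le_pow₀ (M₀ := Int) (n := E) (a := 10) (by norm_num)]
    obtain ⟨L, hL1, hLlo, hLhi, hLE⟩ := limit_len_char limit hlim1
    have hEL2 : E = L / 2 := by rw [hE]; exact hLE
    have hhE : h ≤ (10 : Int) ^ E - 1 := (le_min_iff.mp hle).1
    -- h < 10^E forces d+1 ≤ E
    have hdE : d + 1 ≤ E := by
      by_contra hc
      push_neg at hc
      have : (10 : Int) ^ E ≤ 10 ^ d := pow_le_pow_right₀ (by norm_num) (by omega)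
      omega
    rcases Nat.eq_or_lt_of_le hdE with heq | hlt
    · rw [hdbl, heq]; omega
    · -- d+1 < E: dblA h < 10^(2d+2) ≤ 10^(2E-2) < 10^(L-1) ≤ limit
      have h2E : 2 * E ≤ L := by omega
      have hexp : (10 : Int) ^ (2 * (d + 1)) ≤ 10 ^ (L - 1) :=
        pow_le_pow_right₀ (by norm_num) (by omega)
      rw [hdbl]; omega

-- two step-1 ranges with the same lower end and equivalent upper tests are equal
theorem pyRange_ext (a b b' : Int) (h : ∀ x, a ≤ x → (x < b ↔ x < b')) :
    PySem.List.pyRange a b 1 = PySem.List.pyRange a b' 1 := by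
  by_cases hab : a < b
  · have hab' : a < b' := (h a le_rfl).mp hab
    have hbb' : b = b' := by
      have h1 : b - 1 < b' := (h (b - 1) (by omega)).mp (by omega)
      have h2 : b' - 1 < b := (h (b' - 1) (by omega)).mpr (by omega)
      omega
    rw [hbb']
  · have hab' : ¬ a < b' := fun hc => hab ((h a le_rfl).mpr hc)
    rw [PySem.List.pyRange_one_eq_nil (by omega), PySem.List.pyRange_one_eq_nil (by omega)]

-- A's inner loop on an increasing range of halves equals the closed-form slice
theorem innerA_eq (limit M : Int) (hM : 0 < M) :
    ∀ (n : Nat) (a b : Int), (b - a).toNat = n →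
      (∀ h, a ≤ h → h < b →
        PySem.Int.ofStr? (PySem.Int.toStr h ++ PySem.Int.toStr h) = some (h * M)) →
      ∀ acc, pyAInner limit (PySem.List.pyRange a b 1) acc
        = acc ++ (PySem.List.pyRange a (min b (PySem.Int.floordiv limit M + 1)) 1).map
            (fun h => h * M) := by
  intro n
  induction n with
  | zero =>
    intro a b hn _ acc
    have hba : b ≤ a := by omega
    rw [PySem.List.pyRange_one_eq_nil hba, PySem.List.pyRange_one_eq_nil (by omega : min b _ ≤ a)]
    simp [pyAInner]
  | succ n ihn =>
    intro a b hn hc acc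
    have hab : a < b := by omega
    rw [PySem.List.pyRange_one_cons hab]
    show pyAInner limit (a :: PySem.List.pyRange (a + 1) b 1) acc = _
    rw [pyAInner, hc a le_rfl hab]
    have hstep : (match some (a * M) with
        | none => acc
        | some candidate => if candidate > limit then acc
            else pyAInner limit (PySem.List.pyRange (a + 1) b 1) (acc ++ [candidate]))
        = if a * M > limit then acc
            else pyAInner limit (PySem.List.pyRange (a + 1) b 1) (acc ++ [a * M]) := rfl
    rw [hstep]
    by_cases hbrk : a * M > limit
    · rw [if_pos hbrk]
      have hKa : PySem.Int.floordiv limit M + 1 ≤ a := by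
        have := (PySem.Int.floordiv_lt_iff_lt_mul (a := limit) (q := a) hM).mpr (by omega)
        omega
      rw [PySem.List.pyRange_one_eq_nil (by omega : min b (PySem.Int.floordiv limit M + 1) ≤ a)]
      simp
    · rw [if_neg hbrk]
      have haK : a ≤ PySem.Int.floordiv limit M :=
        (PySem.Int.le_floordiv_iff_mul_le hM).mpr (by omega)
      rw [ihn (a + 1) b (by omega) (fun h hh1 hh2 => hc h (by omega) hh2) (acc ++ [a * M])]
      rw [PySem.List.pyRange_one_cons (by omega : a < min b (PySem.Int.floordiv limit M + 1))]
      simp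

-- one outer-loop step of A, in closed form: the segment of halves with j+1 digits
theorem stepA_closed (limit : Int) (j : Nat) (acc : List Int) :
    pyAInner limit (PySem.List.pyRange ((10 : Int) ^ j) (((10 : Int) ^ (j + 1) - 1) + 1) 1) acc
      = acc ++ (PySem.List.pyRange ((10 : Int) ^ j)
          (min ((10 : Int) ^ (j + 1) - 1) (PySem.Int.floordiv limit ((10 : Int) ^ (j + 1) + 1)) + 1) 1).map
          (fun h => h * ((10 : Int) ^ (j + 1) + 1)) := by
  set M : Int := (10 : Int) ^ (j + 1) + 1 with hM
  have hMpos : 0 < M := by rw [hM]; positivity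
  have hc : ∀ h : Int, (10 : Int) ^ j ≤ h → h < (10 : Int) ^ (j + 1) - 1 + 1 →
      PySem.Int.ofStr? (PySem.Int.toStr h ++ PySem.Int.toStr h) = some (h * M) := by
    intro h hlo' hhi'
    have hpos : 1 ≤ h := le_trans (one_le_pow₀ (by norm_num)) hlo'
    have hlen : (PySem.Int.toChars h).length = j + 1 := by
      rw [toChars_nonneg h (by omega)]
      refine toDigits_length_eq h.toNat j ?_ ?_
      · have : ((10 ^ j : Nat) : Int) ≤ h := by push_cast; omega
        omega
      · have : h < ((10 ^ (j + 1) : Nat) : Int) := by push_cast; omega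
        omega
    rw [parse_double h hpos, hlen, hM]
  rw [innerA_eq limit M hMpos (((10 : Int) ^ (j + 1) - 1 + 1 - 10 ^ j)).toNat (10 ^ j)
      ((10 : Int) ^ (j + 1) - 1 + 1) rfl hc acc]
  have hmin : ∀ E K : Int, min (E - 1 + 1) (K + 1) = min (E - 1) K + 1 := by
    intro E K; omega
  rw [hmin]

-- the first j outer-loop steps of A produce exactly dblA over [1, min(10^j - 1, H)]
theorem segs (limit : Int) : ∀ (j : Nat), j ≤ pvE limit →
    (PySem.List.pyRange 1 ((j : Int) + 1) 1).foldl
      (fun invalid_ids half_len =>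
        pyAInner limit
          (PySem.List.pyRange ((10 : Int) ^ (half_len - 1).toNat)
            (((10 : Int) ^ half_len.toNat - 1) + 1) 1) invalid_ids)
      []
    = (PySem.List.pyRange 1 (min ((10 : Int) ^ j - 1) (pvH limit) + 1) 1).map dblA := by
  intro j
  induction j with
  | zero =>
    intro _
    rw [show (((0 : Nat) : Int)) + 1 = 1 by simp]
    rw [PySem.List.pyRange_one_eq_nil (le_refl (1 : Int))]
    rw [PySem.List.pyRange_one_eq_nil (by omega : min ((10 : Int) ^ 0 - 1) (pvH limit) + 1 ≤ 1)]
    simp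
  | succ j ih =>
    intro hjE
    have hij := ih (by omega)
    rw [show ((j + 1 : Nat) : Int) + 1 = ((j : Int) + 1) + 1 by push_cast; ring]
    rw [PySem.List.pyRange_one_succ_right (by omega : (1 : Int) ≤ (j : Int) + 1), List.foldl_append]
    rw [hij]
    simp only [List.foldl_cons, List.foldl_nil]
    have htn1 : ((j : Int) + 1 - 1).toNat = j := by omega
    have htn2 : ((j : Int) + 1).toNat = j + 1 := by omega
    rw [htn1, htn2, stepA_closed limit j]
    -- replace the per-segment cutoff K_j by the global cutoff H
    have hrange : PySem.List.pyRange ((10 : Int) ^ j)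
        (min ((10 : Int) ^ (j + 1) - 1) (PySem.Int.floordiv limit ((10 : Int) ^ (j + 1) + 1)) + 1) 1
        = PySem.List.pyRange ((10 : Int) ^ j) (min ((10 : Int) ^ (j + 1) - 1) (pvH limit) + 1) 1 := by
      refine pyRange_ext _ _ _ ?_
      intro x hx
      have hx1 : 1 ≤ x := le_trans (one_le_pow₀ (by norm_num)) hx
      have hMpos : (0 : Int) < 10 ^ (j + 1) + 1 := by positivity
      constructor
      · intro hlt
        have hxub : x ≤ (10 : Int) ^ (j + 1) - 1 := by omega
        have hxK : x * ((10 : Int) ^ (j + 1) + 1) ≤ limit := by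
          have : x ≤ PySem.Int.floordiv limit ((10 : Int) ^ (j + 1) + 1) := by omega
          exact (PySem.Int.le_floordiv_iff_mul_le hMpos).mp this
        have hdx : dblA x = x * ((10 : Int) ^ (j + 1) + 1) := dblA_eq x j hx (by omega)
        have := (char_cutoff limit x hx1).mp (by omega)
        omega
      · intro hlt
        have hxub : x ≤ (10 : Int) ^ (j + 1) - 1 := by omega
        have hxH : x ≤ pvH limit := by omega
        have hdx : dblA x = x * ((10 : Int) ^ (j + 1) + 1) := dblA_eq x j hx (by omega)
        have hdl := (char_cutoff limit x hx1).mpr hxH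
        have : x ≤ PySem.Int.floordiv limit ((10 : Int) ^ (j + 1) + 1) :=
          (PySem.Int.le_floordiv_iff_mul_le hMpos).mpr (by omega)
        omega
    rw [hrange]
    -- on that segment, h * M_j is dblA h
    have hmap : (PySem.List.pyRange ((10 : Int) ^ j)
        (min ((10 : Int) ^ (j + 1) - 1) (pvH limit) + 1) 1).map
          (fun h => h * ((10 : Int) ^ (j + 1) + 1))
        = (PySem.List.pyRange ((10 : Int) ^ j)
        (min ((10 : Int) ^ (j + 1) - 1) (pvH limit) + 1) 1).map dblA := by
      refine List.map_congr_left ?_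
      intro x hxmem
      obtain ⟨hxa, hxb⟩ := PySem.List.mem_pyRange_one.mp hxmem
      exact (dblA_eq x j hxa (by omega)).symm
    rw [hmap, ← List.map_append]
    congr 1
    -- glue the ranges
    by_cases hHbig : (10 : Int) ^ j - 1 ≤ pvH limit
    · have hm1 : min ((10 : Int) ^ j - 1) (pvH limit) = (10 : Int) ^ j - 1 := by omega
      have hm2 : (10 : Int) ^ j - 1 ≤ min ((10 : Int) ^ (j + 1) - 1) (pvH limit) := by
        have : (10 : Int) ^ j ≤ 10 ^ (j + 1) := pow_le_pow_right₀ (by norm_num) (by omega)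
        omega
      rw [hm1]
      rw [show (10 : Int) ^ j - 1 + 1 = (10 : Int) ^ j by ring]
      exact (PySem.List.pyRange_one_append 1 ((10 : Int) ^ j)
        (min ((10 : Int) ^ (j + 1) - 1) (pvH limit) + 1)
        (le_trans (by norm_num) (one_le_pow₀ (by norm_num))) (by omega)).symm
    · have hm1 : min ((10 : Int) ^ j - 1) (pvH limit) = pvH limit := by omega
      have hm2 : min ((10 : Int) ^ (j + 1) - 1) (pvH limit) = pvH limit := by
        have : (10 : Int) ^ j ≤ 10 ^ (j + 1) := pow_le_pow_right₀ (by norm_num) (by omega)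
        omega
      rw [hm1, hm2, PySem.List.pyRange_one_eq_nil (by omega : pvH limit + 1 ≤ (10 : Int) ^ j)]
      simp

-- ===== VERDICT (by name: the statement is the Claim_ definition above) =====
theorem generate_invalid_ids_spec : Claim_equal_generate_invalid_ids := by
  intro limit _
  unfold Spec_generate_invalid_ids generate_invalid_ids generate_invalid_ids_alt
  simp only []
  have hL0 : 0 ≤ PySem.Str.len (PySem.Int.toStr limit) := by
    rw [PySem.Str.len_eq]; positivity
  have hfd0 : 0 ≤ PySem.Int.floordiv (PySem.Str.len (PySem.Int.toStr limit)) 2 := by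
    rw [PySem.Int.floordiv_eq_ediv_of_pos (by norm_num)]
    exact Int.ediv_nonneg hL0 (by norm_num)
  have hEcast : PySem.Int.floordiv (PySem.Str.len (PySem.Int.toStr limit)) 2
      = ((pvE limit : Nat) : Int) := by
    unfold pvE; omega
  rw [hEcast]
  have := segs limit (pvE limit) le_rfl
  rw [this]
  have hmin : min ((10 : Int) ^ pvE limit - 1) (pvH limit) = pvH limit := by
    unfold pvH; omega
  rw [hmin]
  rfl
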